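-- pv_equiv track=rewrite | github.com/subhande/Algoexpert | binary_search_tree/08_same_bsts.py | areSameBsts
-- ===== SOURCE A (Python) =====
-- def areSameBsts(arrayOne, arrayTwo, rootIdxOne, rootIdxTwo, minVal, maxval):
--
--     # Check if the root nodes are out of bounds
--     if rootIdxOne == -1 or rootIdxTwo == -1:
--         return rootIdxOne == rootIdxTwo
--
--     # Check if the root nodes are different
--     if arrayOne[rootIdxOne] != arrayTwo[rootIdxTwo]:
--         return False
--
--
--     leftRootIdxOne = getIdxOfFirstSmaller(arrayOne, rootIdxOne, minVal)
--     leftRootIdxTwo = getIdxOfFirstSmaller(arrayTwo, rootIdxTwo, minVal)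
--     rightRootIdxOne = getIdxOfFirstBiggerOrEqual(arrayOne, rootIdxOne, maxval)
--     rightRootIdxTwo = getIdxOfFirstBiggerOrEqual(arrayTwo, rootIdxTwo, maxval)
--
--     currentValue = arrayOne[rootIdxOne]
--     leftAreSame = areSameBsts(arrayOne, arrayTwo, leftRootIdxOne, leftRootIdxTwo, minVal, currentValue)
--     rightAreSame = areSameBsts(arrayOne, arrayTwo, rightRootIdxOne, rightRootIdxTwo, currentValue, maxval)
--
--     return leftAreSame and rightAreSame
--
-- def getIdxOfFirstSmaller(array, startingIdx, minVal):
--     for i in range(startingIdx + 1, len(array)):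
--         if array[i] < array[startingIdx] and array[i] >= minVal:
--             return i
--     return -1
--
-- def getIdxOfFirstBiggerOrEqual(array, startingIdx, maxVal):
--     for i in range(startingIdx + 1, len(array)):
--         if array[i] >= array[startingIdx] and array[i] < maxVal:
--             return i
--     return -1
-- ===== SOURCE B (Python) =====
-- def _build(array, rootIdx, minVal, maxval):
--     # Build the BST rooted at rootIdx as a nested tuple (value, left, right),
--     # finding both children in a single pass over the suffix.
--     if rootIdx == -1:
--         return None
--     root = array[rootIdx]
--     left = right = None
--     for i in range(rootIdx + 1, len(array)):
--         x = array[i]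
--         if left is None and minVal <= x < root:
--             left = i
--         if right is None and root <= x < maxval:
--             right = i
--     return (root,
--             _build(array, left if left is not None else -1, minVal, root),
--             _build(array, right if right is not None else -1, root, maxval))
--
--
-- def _eq(t1, t2):
--     # structural tree comparison with an explicit stack (deep trees are fine)
--     stack = [(t1, t2)]
--     while stack:
--         a, b = stack.pop()
--         if a is None or b is None:
--             if a is not b:
--                 return False
--             continue
--         if a[0] != b[0]:
--             return False
--         stack.append((a[2], b[2]))
--         stack.append((a[1], b[1]))
--     return True
--
--
-- def areSameBsts(arrayOne, arrayTwo, rootIdxOne, rootIdxTwo, minVal, maxval):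
--     if rootIdxOne == -1 or rootIdxTwo == -1:
--         return rootIdxOne == rootIdxTwo
--     return _eq(_build(arrayOne, rootIdxOne, minVal, maxval),
--                _build(arrayTwo, rootIdxTwo, minVal, maxval))
-- ===== Notes on version B (the rewrite author's own statement) =====
-- stated objective: alternative
-- what changed: B builds an explicit BST (nested value/left/right nodes) for each array independently, finding both children of a node in one pass over the suffix, and then compares the two trees structurally, instead of A's simultaneous six-parameter index recursion with two separate first-smaller / first-bigger-or-equal scans per array per node.
import Mathlib
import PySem

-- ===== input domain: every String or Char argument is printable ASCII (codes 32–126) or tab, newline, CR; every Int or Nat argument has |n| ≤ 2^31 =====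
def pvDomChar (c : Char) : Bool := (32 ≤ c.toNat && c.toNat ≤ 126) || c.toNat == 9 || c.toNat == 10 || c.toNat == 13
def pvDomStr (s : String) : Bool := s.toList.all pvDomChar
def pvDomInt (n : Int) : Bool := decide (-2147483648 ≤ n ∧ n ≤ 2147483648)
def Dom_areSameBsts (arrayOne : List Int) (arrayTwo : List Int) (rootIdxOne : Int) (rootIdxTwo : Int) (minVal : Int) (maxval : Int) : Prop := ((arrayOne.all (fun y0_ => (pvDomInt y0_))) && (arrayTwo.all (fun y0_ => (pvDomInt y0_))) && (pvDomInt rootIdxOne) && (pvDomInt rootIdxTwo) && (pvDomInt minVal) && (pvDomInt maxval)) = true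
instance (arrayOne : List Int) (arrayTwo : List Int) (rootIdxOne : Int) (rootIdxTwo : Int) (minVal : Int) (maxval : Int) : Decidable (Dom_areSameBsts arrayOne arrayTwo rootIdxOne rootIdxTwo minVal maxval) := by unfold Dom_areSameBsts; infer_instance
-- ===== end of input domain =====

-- B builds an explicit BST node structure per array (one pass per node finding both
-- children) and compares the two trees, instead of A's simultaneous index recursion
-- with two separate scans per array per node (objective: alternative, not faster).
-- Both ports carry a fuel counter that only makes the recursion total: child indices
-- strictly increase and stay below the length, so the wrappers' fuel always suffices.

-- ===== PORT A =====
def getIdxOfFirstSmaller (array : List Int) (startingIdx : Int) (minVal : Int) : Int :=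
  -- for i in range(startingIdx+1, len(array)): first i with array[i] < array[startingIdx] and array[i] >= minVal, else -1
  (((PySem.List.pyRange (startingIdx + 1) (PySem.List.len array)).find?
      (fun i => decide (PySem.List.pyGetD array i 0 < PySem.List.pyGetD array startingIdx 0 ∧
                        PySem.List.pyGetD array i 0 ≥ minVal))).getD (-1))

def getIdxOfFirstBiggerOrEqual (array : List Int) (startingIdx : Int) (maxVal : Int) : Int :=
  (((PySem.List.pyRange (startingIdx + 1) (PySem.List.len array)).find?
      (fun i => decide (PySem.List.pyGetD array i 0 ≥ PySem.List.pyGetD array startingIdx 0 ∧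
                        PySem.List.pyGetD array i 0 < maxVal))).getD (-1))

def areSameBstsGo : Nat → List Int → List Int → Int → Int → Int → Int → Bool
  | 0, _, _, _, _, _, _ => false   -- never reached: the wrapper's fuel dominates the measure
  | fuel + 1, arrayOne, arrayTwo, rootIdxOne, rootIdxTwo, minVal, maxval =>
    if rootIdxOne = -1 ∨ rootIdxTwo = -1 then decide (rootIdxOne = rootIdxTwo)
    else if PySem.Raise.InRange arrayOne.length rootIdxOne ∧ PySem.Raise.InRange arrayTwo.length rootIdxTwo then
      -- the range guard only makes the indexing total: Python raises IndexError outside it (excluded by Pre_)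
      if PySem.List.pyGetD arrayOne rootIdxOne 0 ≠ PySem.List.pyGetD arrayTwo rootIdxTwo 0 then false
      else
        let leftRootIdxOne := getIdxOfFirstSmaller arrayOne rootIdxOne minVal
        let leftRootIdxTwo := getIdxOfFirstSmaller arrayTwo rootIdxTwo minVal
        let rightRootIdxOne := getIdxOfFirstBiggerOrEqual arrayOne rootIdxOne maxval
        let rightRootIdxTwo := getIdxOfFirstBiggerOrEqual arrayTwo rootIdxTwo maxval
        let currentValue := PySem.List.pyGetD arrayOne rootIdxOne 0
        areSameBstsGo fuel arrayOne arrayTwo leftRootIdxOne leftRootIdxTwo minVal currentValue &&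
        areSameBstsGo fuel arrayOne arrayTwo rightRootIdxOne rightRootIdxTwo currentValue maxval
    else false

def areSameBsts (arrayOne : List Int) (arrayTwo : List Int) (rootIdxOne : Int) (rootIdxTwo : Int) (minVal : Int) (maxval : Int) : Bool :=
  areSameBstsGo (2 * arrayOne.length + 2 * arrayTwo.length + 3)
    arrayOne arrayTwo rootIdxOne rootIdxTwo minVal maxval

-- ===== PORT B =====
inductive PyTree
  | leaf : PyTree
  | node : Int → PyTree → PyTree → PyTree
deriving DecidableEq, Repr

def buildTreeGo : Nat → List Int → Int → Int → Int → PyTree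
  | 0, _, _, _, _ => PyTree.leaf   -- never reached: the wrapper's fuel dominates the measure
  | fuel + 1, array, rootIdx, minVal, maxval =>
    if rootIdx = -1 then PyTree.leaf
    else if PySem.Raise.InRange array.length rootIdx then
      -- Python's array[rootIdx]; the range guard only makes the indexing total (IndexError outside Pre_)
      let root := PySem.List.pyGetD array rootIdx 0
      -- single pass latching the first left child and first right child (None = not found)
      let lr := (PySem.List.pyRange (rootIdx + 1) (PySem.List.len array)).foldl
        (fun (lr : Option Int × Option Int) i =>
          ((if lr.1 = none ∧ minVal ≤ PySem.List.pyGetD array i 0 ∧ PySem.List.pyGetD array i 0 < root then some i else lr.1),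
           (if lr.2 = none ∧ root ≤ PySem.List.pyGetD array i 0 ∧ PySem.List.pyGetD array i 0 < maxval then some i else lr.2)))
        (none, none)
      PyTree.node root
        (buildTreeGo fuel array (lr.1.getD (-1)) minVal root)
        (buildTreeGo fuel array (lr.2.getD (-1)) root maxval)
    else PyTree.leaf

def buildTree (array : List Int) (rootIdx : Int) (minVal : Int) (maxval : Int) : PyTree :=
  buildTreeGo (2 * array.length + 2) array rootIdx minVal maxval

def pyTreeSize : PyTree → Nat
  | PyTree.leaf => 1
  | PyTree.node _ l r => 1 + pyTreeSize l + pyTreeSize r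

-- B's explicit-stack tree comparison (head of the list = top of the stack);
-- the fuel only bounds the loop: each iteration pops one pair
def treeEqGo : Nat → List (PyTree × PyTree) → Bool
  | 0, _ => false   -- never reached: the wrapper's fuel dominates the popped size
  | _ + 1, [] => true
  | fuel + 1, (a, b) :: stack =>
    match a, b with
    | PyTree.leaf, PyTree.leaf => treeEqGo fuel stack
    | PyTree.node v l r, PyTree.node w l' r' =>
      if v ≠ w then false
      else treeEqGo fuel ((l, l') :: (r, r') :: stack)
    | _, _ => false

def treeEq (t1 t2 : PyTree) : Bool := treeEqGo (pyTreeSize t1 + 1) [(t1, t2)]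

def areSameBsts_alt (arrayOne : List Int) (arrayTwo : List Int) (rootIdxOne : Int) (rootIdxTwo : Int) (minVal : Int) (maxval : Int) : Bool :=
  if rootIdxOne = -1 ∨ rootIdxTwo = -1 then decide (rootIdxOne = rootIdxTwo)
  else treeEq (buildTree arrayOne rootIdxOne minVal maxval) (buildTree arrayTwo rootIdxTwo minVal maxval)

-- ===== PRECONDITION & SPEC =====
-- Pre_ admits exactly the inputs where Python A returns: if neither root index is the
-- -1 sentinel, both must be in Python's index range [-len, len) or A raises IndexError.
def Pre_areSameBsts (arrayOne : List Int) (arrayTwo : List Int) (rootIdxOne : Int) (rootIdxTwo : Int) (minVal : Int) (maxval : Int) : Prop :=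
  rootIdxOne = -1 ∨ rootIdxTwo = -1 ∨
    (PySem.Raise.InRange arrayOne.length rootIdxOne ∧ PySem.Raise.InRange arrayTwo.length rootIdxTwo)
instance (arrayOne : List Int) (arrayTwo : List Int) (rootIdxOne : Int) (rootIdxTwo : Int) (minVal : Int) (maxval : Int) : Decidable (Pre_areSameBsts arrayOne arrayTwo rootIdxOne rootIdxTwo minVal maxval) := by unfold Pre_areSameBsts; infer_instance

def pvWitness_areSameBsts : List Int × List Int × Int × Int × Int × Int :=
  ([10, 15, 8, 12, 94, 81, 5, 2, 11], [10, 8, 5, 15, 2, 12, 11, 94, 81], 0, 0, -2147483648, 2147483648)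

def Spec_areSameBsts (arrayOne : List Int) (arrayTwo : List Int) (rootIdxOne : Int) (rootIdxTwo : Int) (minVal : Int) (maxval : Int) (out : Bool) : Prop := out = areSameBsts_alt arrayOne arrayTwo rootIdxOne rootIdxTwo minVal maxval
instance (arrayOne : List Int) (arrayTwo : List Int) (rootIdxOne : Int) (rootIdxTwo : Int) (minVal : Int) (maxval : Int) (out : Bool) : Decidable (Spec_areSameBsts arrayOne arrayTwo rootIdxOne rootIdxTwo minVal maxval out) := by unfold Spec_areSameBsts; infer_instance

-- ===== CLAIM (what is proved, stated in full; the proofs are below) =====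
def Claim_equal_areSameBsts : Prop := ∀ (arrayOne : List Int) (arrayTwo : List Int) (rootIdxOne : Int) (rootIdxTwo : Int) (minVal : Int) (maxval : Int), Dom_areSameBsts arrayOne arrayTwo rootIdxOne rootIdxTwo minVal maxval → Pre_areSameBsts arrayOne arrayTwo rootIdxOne rootIdxTwo minVal maxval → Spec_areSameBsts arrayOne arrayTwo rootIdxOne rootIdxTwo minVal maxval (areSameBsts arrayOne arrayTwo rootIdxOne rootIdxTwo minVal maxval)

-- ===== LEMMAS AND PROOFS =====

-- recursion measure the wrappers' fuel dominates: child indices found by the scans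
-- are either -1 or strictly greater than the parent index and below the length
def pvIdxMeasure (arr : List Int) (i : Int) : Nat :=
  if i = -1 then 0 else ((arr.length : Int) + 1 - i).toNat

-- B's stack loop decides pointwise equality of all stacked pairs
def pvStackSize : List (PyTree × PyTree) → Nat
  | [] => 0
  | p :: st => pyTreeSize p.1 + pvStackSize st

theorem pvTreeEqGoAll (f : Nat) : ∀ (st : List (PyTree × PyTree)), pvStackSize st < f →
    treeEqGo f st = st.all (fun p => decide (p.1 = p.2)) := by
  induction f with
  | zero => intro st h; omega
  | succ f ih =>
    intro st h
    match st with
    | [] => simp [treeEqGo]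
    | (a, b) :: st =>
      cases a with
      | leaf =>
        cases b with
        | leaf =>
          rw [treeEqGo, ih st (by simp [pvStackSize, pyTreeSize] at *; omega)]
          simp
        | node w l' r' => simp [treeEqGo]
      | node v l r =>
        cases b with
        | leaf => simp [treeEqGo]
        | node w l' r' =>
          rw [treeEqGo]
          by_cases hv : v = w
          · rw [if_neg (by simpa using hv),
               ih ((l, l') :: (r, r') :: st) (by simp [pvStackSize, pyTreeSize] at *; omega)]
            simp [PyTree.node.injEq, hv, Bool.and_assoc]
          · rw [if_pos (by simpa using hv)]
            simp [PyTree.node.injEq, hv]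

theorem pvTreeEq (t1 t2 : PyTree) : treeEq t1 t2 = decide (t1 = t2) := by
  rw [treeEq, pvTreeEqGoAll (pyTreeSize t1 + 1) [(t1, t2)] (by simp [pvStackSize])]
  simp

-- first-match latching of B's single scan = find? of each predicate separately
theorem pvLatchFoldl {P Q : Int → Prop} [DecidablePred P] [DecidablePred Q] (L : List Int) (a b : Option Int) :
    L.foldl (fun (lr : Option Int × Option Int) i =>
      ((if lr.1 = none ∧ P i then some i else lr.1),
       (if lr.2 = none ∧ Q i then some i else lr.2))) (a, b)
    = (a.or (L.find? (fun i => decide (P i))), b.or (L.find? (fun i => decide (Q i)))) := by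
  induction L generalizing a b with
  | nil => simp
  | cons x L ih =>
    simp only [List.foldl_cons, ih]
    cases a <;> cases b <;>
      by_cases hP : P x <;> by_cases hQ : Q x <;>
        simp [List.find?_cons, hP, hQ]

-- a first-match scan over range(s+1, L) lands in {-1} ∪ (s, L)
theorem pvScanRange (s L : Int) (p : Int → Bool) :
    ((PySem.List.pyRange (s + 1) L).find? p).getD (-1) = -1 ∨
      (s < ((PySem.List.pyRange (s + 1) L).find? p).getD (-1) ∧
       ((PySem.List.pyRange (s + 1) L).find? p).getD (-1) < L) := by
  cases h : (PySem.List.pyRange (s + 1) L).find? p with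
  | none => simp [h]
  | some x =>
    have hx := List.mem_of_find?_eq_some h
    rw [PySem.List.mem_pyRange_one] at hx
    simp [h]; omega

theorem pvSmallerRange (a : List Int) (i mn : Int) :
    getIdxOfFirstSmaller a i mn = -1 ∨
      (i < getIdxOfFirstSmaller a i mn ∧ getIdxOfFirstSmaller a i mn < (a.length : Int)) := by
  have := pvScanRange i (PySem.List.len a)
    (fun k => decide (PySem.List.pyGetD a k 0 < PySem.List.pyGetD a i 0 ∧
                      PySem.List.pyGetD a k 0 ≥ mn))
  simpa [getIdxOfFirstSmaller, PySem.List.len_eq] using this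

theorem pvBiggerRange (a : List Int) (i mx : Int) :
    getIdxOfFirstBiggerOrEqual a i mx = -1 ∨
      (i < getIdxOfFirstBiggerOrEqual a i mx ∧ getIdxOfFirstBiggerOrEqual a i mx < (a.length : Int)) := by
  have := pvScanRange i (PySem.List.len a)
    (fun k => decide (PySem.List.pyGetD a k 0 ≥ PySem.List.pyGetD a i 0 ∧
                      PySem.List.pyGetD a k 0 < mx))
  simpa [getIdxOfFirstBiggerOrEqual, PySem.List.len_eq] using this

-- a child index is strictly smaller in measure and again valid-or-(-1)
theorem pvMeasureChild (a : List Int) (i c : Int) (hne : i ≠ -1) (h : PySem.Raise.InRange a.length i)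
    (hc : c = -1 ∨ (i < c ∧ c < (a.length : Int))) :
    pvIdxMeasure a c < pvIdxMeasure a i ∧ (c = -1 ∨ PySem.Raise.InRange a.length c) := by
  unfold pvIdxMeasure PySem.Raise.InRange at *
  split_ifs <;> omega

theorem pvBuildLeaf (f : Nat) (a : List Int) (mn mx : Int) :
    buildTreeGo f a (-1) mn mx = PyTree.leaf := by
  cases f <;> simp [buildTreeGo]

-- one unfolding of buildTreeGo at a valid root: B's single latching pass finds
-- exactly A's first-smaller / first-bigger-or-equal indices
theorem pvBuildUnfold (f : Nat) (array : List Int) (i mn mx : Int) (hne : i ≠ -1)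
    (h : PySem.Raise.InRange array.length i) :
    buildTreeGo (f + 1) array i mn mx = PyTree.node (PySem.List.pyGetD array i 0)
      (buildTreeGo f array (getIdxOfFirstSmaller array i mn) mn (PySem.List.pyGetD array i 0))
      (buildTreeGo f array (getIdxOfFirstBiggerOrEqual array i mx) (PySem.List.pyGetD array i 0) mx) := by
  rw [buildTreeGo]
  rw [if_neg hne, if_pos h]
  simp only [pvLatchFoldl, Option.none_or]
  rw [show (fun k => decide (mn ≤ PySem.List.pyGetD array k 0 ∧
        PySem.List.pyGetD array k 0 < PySem.List.pyGetD array i 0))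
      = (fun k => decide (PySem.List.pyGetD array k 0 < PySem.List.pyGetD array i 0 ∧
        PySem.List.pyGetD array k 0 ≥ mn)) from funext fun k => decide_eq_decide.mpr and_comm]
  rw [show (fun k => decide (PySem.List.pyGetD array i 0 ≤ PySem.List.pyGetD array k 0 ∧
        PySem.List.pyGetD array k 0 < mx))
      = (fun k => decide (PySem.List.pyGetD array k 0 ≥ PySem.List.pyGetD array i 0 ∧
        PySem.List.pyGetD array k 0 < mx)) from funext fun k => decide_eq_decide.mpr Iff.rfl]
  rfl

-- core: A's simultaneous recursion decides equality of B's two trees, for any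
-- sufficient fuels (the wrappers pass measure + 1)
theorem pvMain (n : Nat) : ∀ (a1 a2 : List Int) (i j mn mx : Int) (fa g1 g2 : Nat),
    pvIdxMeasure a1 i + pvIdxMeasure a2 j ≤ n → n < fa →
    pvIdxMeasure a1 i < g1 → pvIdxMeasure a2 j < g2 →
    (i = -1 ∨ PySem.Raise.InRange a1.length i) →
    (j = -1 ∨ PySem.Raise.InRange a2.length j) →
    areSameBstsGo fa a1 a2 i j mn mx = decide (buildTreeGo g1 a1 i mn mx = buildTreeGo g2 a2 j mn mx) := by
  induction n with
  | zero =>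
    intro a1 a2 i j mn mx fa g1 g2 hm hfa hg1 hg2 hi hj
    obtain ⟨fa', rfl⟩ : ∃ k, fa = k + 1 := ⟨fa - 1, by omega⟩
    have hi1 : i = -1 := by
      by_cases hc : i = -1
      · exact hc
      · exfalso
        rcases hi with h | h
        · exact hc h
        · unfold pvIdxMeasure PySem.Raise.InRange at *; split_ifs at hm <;> omega
    have hj1 : j = -1 := by
      by_cases hc : j = -1
      · exact hc
      · exfalso
        rcases hj with h | h
        · exact hc h
        · unfold pvIdxMeasure PySem.Raise.InRange at *; split_ifs at hm <;> omega
    subst hi1; subst hj1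
    rw [areSameBstsGo, if_pos (Or.inl rfl), pvBuildLeaf, pvBuildLeaf]
    simp
  | succ n ih =>
    intro a1 a2 i j mn mx fa g1 g2 hm hfa hg1 hg2 hi hj
    obtain ⟨fa', rfl⟩ : ∃ k, fa = k + 1 := ⟨fa - 1, by omega⟩
    by_cases hi1 : i = -1
    · by_cases hj1 : j = -1
      · subst hi1; subst hj1
        rw [areSameBstsGo, if_pos (Or.inl rfl), pvBuildLeaf, pvBuildLeaf]
        simp
      · subst hi1
        rcases hj with h | h
        · exact absurd h hj1
        obtain ⟨g2', rfl⟩ : ∃ k, g2 = k + 1 := ⟨g2 - 1, by omega⟩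
        rw [areSameBstsGo, if_pos (Or.inl rfl)]
        rw [pvBuildUnfold g2' a2 j mn mx hj1 h, pvBuildLeaf]
        simp [Ne.symm hj1]
    · by_cases hj1 : j = -1
      · subst hj1
        rcases hi with h | h
        · exact absurd h hi1
        obtain ⟨g1', rfl⟩ : ∃ k, g1 = k + 1 := ⟨g1 - 1, by omega⟩
        rw [areSameBstsGo, if_pos (Or.inr rfl)]
        rw [pvBuildUnfold g1' a1 i mn mx hi1 h, pvBuildLeaf]
        simp [hi1]
      · rcases hi with h | h1
        · exact absurd h hi1
        rcases hj with h | h2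
        · exact absurd h hj1
        obtain ⟨g1', rfl⟩ : ∃ k, g1 = k + 1 := ⟨g1 - 1, by omega⟩
        obtain ⟨g2', rfl⟩ : ∃ k, g2 = k + 1 := ⟨g2 - 1, by omega⟩
        have hbase : ¬ (i = -1 ∨ j = -1) := by simp [hi1, hj1]
        rw [areSameBstsGo, if_neg hbase, if_pos ⟨h1, h2⟩]
        dsimp only
        rw [pvBuildUnfold g1' a1 i mn mx hi1 h1, pvBuildUnfold g2' a2 j mn mx hj1 h2]
        by_cases hv : PySem.List.pyGetD a1 i 0 = PySem.List.pyGetD a2 j 0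
        · rw [if_neg (by simpa using hv)]
          have hcl1 := pvMeasureChild a1 i (getIdxOfFirstSmaller a1 i mn) hi1 h1 (pvSmallerRange a1 i mn)
          have hcl2 := pvMeasureChild a2 j (getIdxOfFirstSmaller a2 j mn) hj1 h2 (pvSmallerRange a2 j mn)
          have hcr1 := pvMeasureChild a1 i (getIdxOfFirstBiggerOrEqual a1 i mx) hi1 h1 (pvBiggerRange a1 i mx)
          have hcr2 := pvMeasureChild a2 j (getIdxOfFirstBiggerOrEqual a2 j mx) hj1 h2 (pvBiggerRange a2 j mx)
          rw [ih a1 a2 _ _ mn (PySem.List.pyGetD a1 i 0) fa' g1' g2'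
                (by omega) (by omega) (by omega) (by omega) hcl1.2 hcl2.2]
          rw [ih a1 a2 _ _ (PySem.List.pyGetD a1 i 0) mx fa' g1' g2'
                (by omega) (by omega) (by omega) (by omega) hcr1.2 hcr2.2]
          rw [← hv]
          simp [PyTree.node.injEq]
        · rw [if_pos (by simpa using hv)]
          simp [PyTree.node.injEq, hv]

-- ===== VERDICT (by name: the statement is the Claim_ definition above) =====
theorem areSameBsts_spec : Claim_equal_areSameBsts := by
  intro a1 a2 i j mn mx hdom hpre
  unfold Spec_areSameBsts areSameBsts areSameBsts_alt buildTree
  by_cases hb : i = -1 ∨ j = -1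
  · obtain ⟨f, hf⟩ : ∃ k, 2 * a1.length + 2 * a2.length + 3 = k + 1 := ⟨_, rfl⟩
    rw [hf, areSameBstsGo, if_pos hb, if_pos hb]
  · rw [if_neg hb, pvTreeEq]
    rcases hpre with h | h | ⟨h1, h2⟩
    · exact absurd (Or.inl h) hb
    · exact absurd (Or.inr h) hb
    · refine pvMain (pvIdxMeasure a1 i + pvIdxMeasure a2 j) a1 a2 i j mn mx _ _ _
        le_rfl ?_ ?_ ?_ (Or.inr h1) (Or.inr h2) <;>
        (unfold pvIdxMeasure PySem.Raise.InRange at *; split_ifs <;> omega)
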